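-- pv_equiv track=rewrite | github.com/baloo365/Algo | week6/Solution_swea_5203_베이비진게임.py | check_baby_gin
-- ===== SOURCE A (Python) =====
-- def check_baby_gin(p):  # 베이비진 판별
--     for i in p:
--         if p.count(i) >= 3:  # 동일 수 3개
--             return True
--
--     p.sort()
--     for a in range(len(p)-2):
--         if (p[a] in p) and (p[a] + 1 in p) and (p[a] + 2 in p):
--             return True
--
--     return False
-- ===== SOURCE B (Python) =====
-- def check_baby_gin(p):  # counting pass + sorted-distinct adjacency scan; keeps A's in-place p.sort()
--     counts = {}
--     for x in p:
--         c = counts.get(x, 0) + 1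
--         if c == 3:
--             return True
--         counts[x] = c
--     p.sort()  # preserve A's in-place mutation on the non-triple path
--     uniq = sorted(set(p))
--     for a, b, c in zip(uniq, uniq[1:], uniq[2:]):
--         if b == a + 1 and c == a + 2:
--             return True
--     return False
-- ===== Notes on version B (the rewrite author's own statement) =====
-- stated objective: faster
-- what changed: Replaces A's per-element p.count scans and per-index '+1 in p / +2 in p' membership scans with one early-exit counting pass over a dict and a single adjacency scan over the sorted distinct values; p.sort() is kept for the in-place mutation side effect.
import Mathlib
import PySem

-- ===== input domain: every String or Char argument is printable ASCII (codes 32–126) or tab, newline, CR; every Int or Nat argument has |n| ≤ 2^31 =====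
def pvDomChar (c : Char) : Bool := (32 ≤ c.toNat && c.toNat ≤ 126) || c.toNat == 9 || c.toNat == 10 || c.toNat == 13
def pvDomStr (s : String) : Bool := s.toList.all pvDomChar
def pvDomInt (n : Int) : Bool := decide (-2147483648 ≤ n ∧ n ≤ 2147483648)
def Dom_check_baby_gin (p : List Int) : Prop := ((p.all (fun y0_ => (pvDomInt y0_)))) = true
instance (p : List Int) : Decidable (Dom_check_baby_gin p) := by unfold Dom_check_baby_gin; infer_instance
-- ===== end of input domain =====

-- B replaces A's quadratic count/membership scans by one counting pass plus an adjacency scan of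
-- the sorted distinct values (faster); A and B both sort p in place on the non-triple path, and the
-- equivalence proved here is about the return value.


-- ===== PORT A =====
def check_baby_gin (p : List Int) : Bool :=
  -- for i in p: if p.count(i) >= 3: return True
  if p.any (fun i => 3 ≤ PySem.List.count p i) then true
  else
    -- p.sort()
    let ps := PySem.List.sorted p (fun x => x) false
    -- for a in range(len(p)-2): if (p[a] in p) and (p[a]+1 in p) and (p[a]+2 in p): return True
    if (PySem.List.pyRange 0 ((ps.length : Int) - 2) 1).any (fun a =>
        ps.contains (PySem.List.pyGetD ps a 0) &&
        ps.contains (PySem.List.pyGetD ps a 0 + 1) &&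
        ps.contains (PySem.List.pyGetD ps a 0 + 2)) then true
    else false

-- ===== PORT B =====
-- counting loop with early exit at the third occurrence
def altPhase1 : List Int → PySem.Dict Int Int → Bool
  | [], _ => false
  | x :: xs, d =>
    let c := d.getD x 0 + 1
    if c == 3 then true
    else altPhase1 xs (d.insert x c)

-- for a, b, c in zip(uniq, uniq[1:], uniq[2:]): if b == a+1 and c == a+2: return True
def altScan : List Int → Bool
  | a :: b :: c :: t => (b == a + 1 && c == a + 2) || altScan (b :: c :: t)
  | _ => false

def check_baby_gin_alt (p : List Int) : Bool :=
  if altPhase1 p PySem.Dict.empty then true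
  else
    let ps := PySem.List.sorted p (fun x => x) false   -- p.sort()
    let uniq := PySem.List.sorted (PySem.Set.ofList ps) (fun x => x) false  -- sorted(set(p))
    altScan uniq

-- ===== PRECONDITION & SPEC =====
def Spec_check_baby_gin (p : List Int) (out : Bool) : Prop := out = check_baby_gin_alt p
instance (p : List Int) (out : Bool) : Decidable (Spec_check_baby_gin p out) := by unfold Spec_check_baby_gin; infer_instance

-- ===== CLAIM (what is proved, stated in full; the proofs are below) =====
def Claim_equal_check_baby_gin : Prop := ∀ (p : List Int), Dom_check_baby_gin p → Spec_check_baby_gin p (check_baby_gin p)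

-- ===== LEMMAS AND PROOFS =====

lemma count_append_single (pre : List Int) (x y : Int) :
    (pre ++ [x]).count y = pre.count y + (if x = y then 1 else 0) := by
  simp [List.count_append, List.count_singleton]

lemma count_cons_head (x y : Int) (xs : List Int) :
    (x :: xs).count y = xs.count y + (if x = y then 1 else 0) := by
  simp [List.count_cons]

-- phase 1: the early-exit counting loop fires iff some element's total count reaches 3
lemma altPhase1_aux (xs : List Int) (d : PySem.Dict Int Int) (pre : List Int)
    (hd : ∀ x, d.getD x 0 = (pre.count x : Int))
    (hb : ∀ x, pre.count x ≤ 2) :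
    altPhase1 xs d = decide (∃ x ∈ xs, 3 ≤ pre.count x + xs.count x) := by
  induction xs generalizing d pre with
  | nil => simp [altPhase1]
  | cons x xs ih =>
    rw [altPhase1]
    simp only [hd x]
    by_cases h2 : pre.count x = 2
    · have hc : ((pre.count x : Int) + 1 == 3) = true := by rw [h2]; decide
      rw [hc]
      simp only [if_true]
      symm
      rw [decide_eq_true_eq]
      exact ⟨x, List.mem_cons_self, by rw [List.count_cons_self]; omega⟩
    · have hle : pre.count x ≤ 1 := by have := hb x; omega
      have hcond : ¬(((pre.count x : Int) + 1 == 3) = true) := by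
        simp only [beq_iff_eq]
        intro h; omega
      rw [if_neg hcond]
      rw [ih (d.insert x ((pre.count x : Int) + 1)) (pre ++ [x]) ?_ ?_]
      · rw [decide_eq_decide]
        constructor
        · rintro ⟨y, hy, h3⟩
          refine ⟨y, List.mem_cons_of_mem _ hy, ?_⟩
          rw [count_append_single] at h3
          rw [count_cons_head]
          split_ifs at h3 ⊢ <;> omega
        · rintro ⟨y, hy, h3⟩
          rcases List.mem_cons.mp hy with rfl | hy'
          · rw [count_cons_head, if_pos rfl] at h3
            have hxm : y ∈ xs := by
              by_contra hno
              have hz : xs.count y = 0 := List.count_eq_zero.mpr hno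
              omega
            refine ⟨y, hxm, ?_⟩
            rw [count_append_single, if_pos rfl]
            omega
          · refine ⟨y, hy', ?_⟩
            rw [count_append_single]
            rw [count_cons_head] at h3
            split_ifs at h3 ⊢ <;> omega
      · intro y
        rw [PySem.Dict.getD_insert, count_append_single]
        by_cases hxy : y = x
        · subst hxy
          rw [if_pos rfl, if_pos rfl]
          push_cast
          ring
        · rw [if_neg hxy, if_neg (fun h => hxy h.symm), hd y, Nat.add_zero]
      · intro y
        rw [count_append_single]
        by_cases hxy : x = y
        · subst hxy
          rw [if_pos rfl]
          omega
        · rw [if_neg hxy]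
          have := hb y
          omega

lemma altPhase1_eq (p : List Int) :
    altPhase1 p PySem.Dict.empty = p.any (fun i => 3 ≤ PySem.List.count p i) := by
  rw [altPhase1_aux p PySem.Dict.empty []
      (by intro x; simp [PySem.Dict.getD_empty]) (by intro x; simp)]
  rw [Bool.eq_iff_iff]
  simp [List.any_eq_true, PySem.List.count_eq]

-- altScan is preserved when a new head is consed on
lemma altScan_cons (y : Int) (t : List Int) (h : altScan t = true) : altScan (y :: t) = true := by
  match t with
  | [] => simp [altScan] at h
  | [b] => simp [altScan] at h
  | b :: c :: t' => rw [altScan]; rw [h]; simp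

-- a successful scan exhibits three consecutive members
lemma altScan_sound (l : List Int) (h : altScan l = true) :
    ∃ x, x ∈ l ∧ x + 1 ∈ l ∧ x + 2 ∈ l := by
  match l with
  | [] => simp [altScan] at h
  | [a] => simp [altScan] at h
  | [a, b] => simp [altScan] at h
  | a :: b :: c :: t =>
    rw [altScan] at h
    rcases Bool.or_eq_true_iff.mp h with h1 | h1
    · rcases Bool.and_eq_true_iff.mp h1 with ⟨hb, hc⟩
      exact ⟨a, by simp, by simp [eq_of_beq hb], by simp [eq_of_beq hc]⟩
    · obtain ⟨x, h1, h2, h3⟩ := altScan_sound (b :: c :: t) h1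
      exact ⟨x, by simp_all, by simp_all, by simp_all⟩

-- on a strictly increasing list, three consecutive members are adjacent, so the scan finds them
lemma altScan_complete (l : List Int) (hl : l.Pairwise (· < ·)) (x : Int)
    (h1 : x ∈ l) (h2 : x + 1 ∈ l) (h3 : x + 2 ∈ l) : altScan l = true := by
  match l with
  | [] => simp at h1
  | y :: t =>
    have hpt : t.Pairwise (· < ·) := (List.pairwise_cons.mp hl).2
    have hyt : ∀ z ∈ t, y < z := (List.pairwise_cons.mp hl).1
    by_cases hxy : y = x
    · subst hxy
      have h2t : y + 1 ∈ t := by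
        rcases List.mem_cons.mp h2 with h | h
        · omega
        · exact h
      have h3t : y + 2 ∈ t := by
        rcases List.mem_cons.mp h3 with h | h
        · omega
        · exact h
      match t, hpt, hyt, h2t, h3t with
      | z :: t', hpt, hyt, h2t, h3t =>
        have hzt' : ∀ w ∈ t', z < w := (List.pairwise_cons.mp hpt).1
        have hz : z = y + 1 := by
          rcases List.mem_cons.mp h2t with h | h
          · omega
          · have hzw := hzt' _ h
            have hyz := hyt _ List.mem_cons_self
            omega
        subst hz
        have h3t' : y + 2 ∈ t' := by
          rcases List.mem_cons.mp h3t with h | h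
          · omega
          · exact h
        match t', hzt', h3t' with
        | w :: t'', hzt', h3t' =>
          have hw : w = y + 2 := by
            rcases List.mem_cons.mp h3t' with h | h
            · omega
            · have := (List.pairwise_cons.mp (List.pairwise_cons.mp hpt).2).1 _ h
              have := hzt' _ List.mem_cons_self
              omega
          subst hw
          rw [altScan]
          simp
    · have h1t : x ∈ t := by
        rcases List.mem_cons.mp h1 with h | h
        · exact absurd h.symm hxy
        · exact h
      have hyx : y < x := hyt _ h1t
      have h2t : x + 1 ∈ t := by
        rcases List.mem_cons.mp h2 with h | h
        · omega
        · exact h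
      have h3t : x + 2 ∈ t := by
        rcases List.mem_cons.mp h3 with h | h
        · omega
        · exact h
      exact altScan_cons y t (altScan_complete t hpt x h1t h2t h3t)

-- phase 2 of A: the index loop over the sorted list fires iff some x has x, x+1, x+2 all present
lemma phaseA2_eq (ps : List Int) (hs : ps.Pairwise (· ≤ ·)) :
    ((PySem.List.pyRange 0 ((ps.length : Int) - 2) 1).any (fun a =>
        ps.contains (PySem.List.pyGetD ps a 0) &&
        ps.contains (PySem.List.pyGetD ps a 0 + 1) &&
        ps.contains (PySem.List.pyGetD ps a 0 + 2)))
      = decide (∃ x, x ∈ ps ∧ x + 1 ∈ ps ∧ x + 2 ∈ ps) := by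
  rw [Bool.eq_iff_iff]
  simp only [List.any_eq_true, PySem.List.mem_pyRange_one, decide_eq_true_eq]
  constructor
  · rintro ⟨a, ⟨ha0, ha2⟩, hf⟩
    have halen : a < (ps.length : Int) := by omega
    have hget : PySem.List.pyGetD ps a 0 = ps[a.toNat] :=
      PySem.List.pyGetD_eq_getElem ps 0 ha0 halen
    simp only [Bool.and_eq_true, List.contains_eq_mem, decide_eq_true_eq] at hf
    exact ⟨PySem.List.pyGetD ps a 0, by rw [hget]; exact List.getElem_mem _, hf.1.2, hf.2⟩
  · rintro ⟨x, h1, h2, h3⟩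
    obtain ⟨i, hi, hie⟩ := List.getElem_of_mem h1
    obtain ⟨j, hj, hje⟩ := List.getElem_of_mem h2
    obtain ⟨k, hk, hke⟩ := List.getElem_of_mem h3
    have hpg := List.pairwise_iff_getElem.mp hs
    have hij : i < j := by
      by_contra hc
      rcases Nat.lt_or_ge j i with hji | hge
      · have hle := hpg j i hj hi hji
        rw [hie, hje] at hle
        omega
      · have : i = j := by omega
        subst this
        rw [hie] at hje
        omega
    have hjk : j < k := by
      by_contra hc
      rcases Nat.lt_or_ge k j with hkj | hge
      · have hle := hpg k j hk hj hkj
        rw [hje, hke] at hle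
        omega
      · have : j = k := by omega
        subst this
        rw [hje] at hke
        omega
    refine ⟨(i : Int), ⟨by omega, by omega⟩, ?_⟩
    have hget : PySem.List.pyGetD ps (i : Int) 0 = x := by
      rw [PySem.List.pyGetD_eq_getElem ps 0 (by omega) (by exact_mod_cast hi)]
      simpa using hie
    simp only [hget, Bool.and_eq_true, List.contains_eq_mem, decide_eq_true_eq]
    exact ⟨⟨h1, h2⟩, h3⟩

-- ===== VERDICT (by name: the statement is the Claim_ definition above) =====
theorem check_baby_gin_spec : Claim_equal_check_baby_gin := by
  intro p _
  unfold Spec_check_baby_gin check_baby_gin check_baby_gin_alt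
  rw [altPhase1_eq]
  cases hany : p.any (fun i => 3 ≤ PySem.List.count p i) with
  | true => simp
  | false =>
    simp only [Bool.false_eq_true, if_false]
    have hs : (PySem.List.sorted p (fun x => x) false).Pairwise (· ≤ ·) :=
      PySem.List.sorted_pairwise p (fun x => x)
    rw [phaseA2_eq _ hs]
    set ps := PySem.List.sorted p (fun x => x) false with hps
    set uniq := PySem.List.sorted (PySem.Set.ofList ps) (fun x => x) false with hu
    have hul : uniq.Pairwise (· < ·) := PySem.List.sorted_ofList_pairwise_lt ps
    have hmem : ∀ x, x ∈ uniq ↔ x ∈ ps := by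
      intro x
      rw [hu, PySem.List.mem_sorted, PySem.Set.mem_ofList]
    rw [Bool.eq_iff_iff]
    constructor
    · intro h
      have hex : ∃ x, x ∈ ps ∧ x + 1 ∈ ps ∧ x + 2 ∈ ps := by simpa using h
      obtain ⟨x, h1, h2, h3⟩ := hex
      exact altScan_complete uniq hul x ((hmem x).mpr h1) ((hmem _).mpr h2) ((hmem _).mpr h3)
    · intro h
      obtain ⟨x, h1, h2, h3⟩ := altScan_sound uniq h
      have hex : ∃ x, x ∈ ps ∧ x + 1 ∈ ps ∧ x + 2 ∈ ps :=
        ⟨x, (hmem x).mp h1, (hmem _).mp h2, (hmem _).mp h3⟩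
      simpa using hex
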